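-- pv_equiv track=rewrite | github.com/vegber/INF273 | implementation/operator_helper_class.py | which_cars
-- ===== SOURCE A (Python) =====
-- def which_cars(arr, first_swap_index, second_valid_index):
--     car_index = []
--     car_count = 0
--     for x in range(len(arr)):
--         if x == first_swap_index or x == second_valid_index:
--             car_index.append(car_count)
--         if arr[x] == 0:
--             car_count += 1
--     return car_index[0], car_index[1]
-- ===== SOURCE B (Python) =====
-- def which_cars(arr, first_swap_index, second_valid_index):
--     positions = [i for i in range(len(arr))
--                  if i == first_swap_index or i == second_valid_index]
--     counts = [arr[:p].count(0) for p in positions]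
--     return counts[0], counts[1]
-- ===== Notes on version B (the rewrite author's own statement) =====
-- stated objective: alternative
-- what changed: Replaces the single accumulating pass (running zero-counter appended at each matching index) with a gather-then-count decomposition: first collect the matching positions, then compute each answer independently as the zero count of the prefix slice before that position.
import Mathlib
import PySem

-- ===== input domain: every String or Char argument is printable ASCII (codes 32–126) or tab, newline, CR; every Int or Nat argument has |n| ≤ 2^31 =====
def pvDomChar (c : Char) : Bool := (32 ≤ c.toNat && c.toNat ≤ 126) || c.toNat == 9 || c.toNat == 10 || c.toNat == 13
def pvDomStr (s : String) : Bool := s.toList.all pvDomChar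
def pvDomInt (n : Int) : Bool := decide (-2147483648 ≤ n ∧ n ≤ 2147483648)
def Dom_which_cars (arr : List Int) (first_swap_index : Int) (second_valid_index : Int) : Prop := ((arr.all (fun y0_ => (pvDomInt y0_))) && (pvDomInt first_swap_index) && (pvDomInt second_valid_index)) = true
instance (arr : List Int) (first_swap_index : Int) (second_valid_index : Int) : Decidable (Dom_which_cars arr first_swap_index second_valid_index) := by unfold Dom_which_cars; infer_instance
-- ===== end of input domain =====

-- B replaces A's single accumulating pass (running zero-counter appended at each matching
-- index) with a gather-then-count decomposition: collect the matching positions, then count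
-- zeros in the prefix slice before each position independently (alternative, same cost).


-- ===== PORT A =====
def which_cars (arr : List Int) (first_swap_index : Int) (second_valid_index : Int) : Int × Int :=
  let st := (PySem.List.pyRange 0 (arr.length : Int) 1).foldl
    (fun (st : List Int × Int) x =>
      (if x = first_swap_index ∨ x = second_valid_index then st.1 ++ [st.2] else st.1,
       if PySem.List.pyGetD arr x 0 = 0 then st.2 + 1 else st.2))
    ([], 0)
  (PySem.List.pyGetD st.1 0 0, PySem.List.pyGetD st.1 1 0)

-- ===== PORT B =====
def which_cars_alt (arr : List Int) (first_swap_index : Int) (second_valid_index : Int) : Int × Int :=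
  let positions := (PySem.List.pyRange 0 (arr.length : Int) 1).filter
    (fun i => decide (i = first_swap_index ∨ i = second_valid_index))
  let counts := positions.map
    (fun p => ((PySem.List.count (PySem.List.slice arr none (some p)) 0 : Nat) : Int))
  (PySem.List.pyGetD counts 0 0, PySem.List.pyGetD counts 1 0)

-- ===== PRECONDITION & SPEC =====
-- A raises IndexError unless the two indices are distinct positions in range(len(arr)).
def Pre_which_cars (arr : List Int) (first_swap_index : Int) (second_valid_index : Int) : Prop :=
  0 ≤ first_swap_index ∧ first_swap_index < (arr.length : Int) ∧
  0 ≤ second_valid_index ∧ second_valid_index < (arr.length : Int) ∧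
  first_swap_index ≠ second_valid_index
instance (arr : List Int) (first_swap_index : Int) (second_valid_index : Int) : Decidable (Pre_which_cars arr first_swap_index second_valid_index) := by unfold Pre_which_cars; infer_instance
def pvWitness_which_cars : List Int × Int × Int := ([0, 1], 0, 1)

def Spec_which_cars (arr : List Int) (first_swap_index : Int) (second_valid_index : Int) (out : Int × Int) : Prop := out = which_cars_alt arr first_swap_index second_valid_index
instance (arr : List Int) (first_swap_index : Int) (second_valid_index : Int) (out : Int × Int) : Decidable (Spec_which_cars arr first_swap_index second_valid_index out) := by unfold Spec_which_cars; infer_instance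

-- ===== CLAIM (what is proved, stated in full; the proofs are below) =====
def Claim_equal_which_cars : Prop := ∀ (arr : List Int) (first_swap_index : Int) (second_valid_index : Int), Dom_which_cars arr first_swap_index second_valid_index → Pre_which_cars arr first_swap_index second_valid_index → Spec_which_cars arr first_swap_index second_valid_index (which_cars arr first_swap_index second_valid_index)

-- ===== LEMMAS AND PROOFS =====

-- running prefix zero-count at position x
def pvCnt (arr : List Int) (x : Int) : Int := ((arr.take x.toNat).count 0 : Int)

lemma loopA (arr : List Int) (f s : Int) (m : Nat) (hm : m ≤ arr.length) :
    (PySem.List.pyRange 0 (m : Int) 1).foldl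
      (fun (st : List Int × Int) x =>
        (if x = f ∨ x = s then st.1 ++ [st.2] else st.1,
         if PySem.List.pyGetD arr x 0 = 0 then st.2 + 1 else st.2))
      ([], 0)
    = (((PySem.List.pyRange 0 (m : Int) 1).filter (fun x => decide (x = f ∨ x = s))).map (pvCnt arr),
       ((arr.take m).count 0 : Int)) := by
  induction m with
  | zero =>
      simp [PySem.List.pyRange_one_eq_nil (le_refl (0 : Int))]
  | succ k ih =>
      have hk : k ≤ arr.length := Nat.le_of_succ_le hm
      have hklt : k < arr.length := hm
      have hcast : ((k + 1 : Nat) : Int) = (k : Int) + 1 := by push_cast; ring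
      rw [hcast, PySem.List.pyRange_one_succ_right (by positivity), List.foldl_append,
        List.filter_append, List.map_append, ih hk]
      have hget : PySem.List.pyGetD arr (k : Int) 0 = arr[k] := by
        rw [PySem.List.pyGetD_natCast, List.getD_eq_getElem arr 0 hklt]
      have htake : arr.take (k + 1) = arr.take k ++ [arr[k]] := by
        rw [List.take_add_one]
        simp [List.getElem?_eq_getElem hklt]
      have hcnt : pvCnt arr (k : Int) = ((arr.take k).count 0 : Int) := by
        simp [pvCnt]
      simp only [List.foldl_cons, List.foldl_nil, List.filter_cons, List.filter_nil,
        hget, htake, List.count_append]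
      by_cases h1 : (k : Int) = f ∨ (k : Int) = s <;>
        by_cases h2 : arr[k] = 0 <;>
          simp [h1, h2, hcnt, List.count_nil]

-- ===== VERDICT (by name: the statement is the Claim_ definition above) =====
theorem which_cars_spec : Claim_equal_which_cars := by
  intro arr f s _ _
  unfold Spec_which_cars which_cars which_cars_alt
  rw [loopA arr f s arr.length (le_refl _)]
  have hmap : ((PySem.List.pyRange 0 (arr.length : Int) 1).filter
        (fun i => decide (i = f ∨ i = s))).map
        (fun p => ((PySem.List.count (PySem.List.slice arr none (some p)) 0 : Nat) : Int))
      = ((PySem.List.pyRange 0 (arr.length : Int) 1).filter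
        (fun i => decide (i = f ∨ i = s))).map (pvCnt arr) := by
    refine List.map_congr_left ?_
    intro p hp
    have hp0 : 0 ≤ p := (PySem.List.mem_pyRange_one.mp (List.mem_of_mem_filter hp)).1
    simp [PySem.List.count_eq, PySem.List.slice_to arr hp0, pvCnt]
  simp only [hmap]
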